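-- pv_equiv track=rewrite | github.com/JChan23/KLCC-Solutions | Gold/Question 9/Question9Code.py | q9
-- ===== SOURCE A (Python) =====
-- def q9(matrix, n):
--     if not matrix or not matrix[0]:
--         return 0
--
--     rows, cols = len(matrix), len(matrix[0])
--     visited = [[False for _ in range(cols)] for _ in range(rows)]
--
--     def dfs(r, c):
--         if r < 0 or r >= rows or c < 0 or c >= cols or visited[r][c] or matrix[r][c] == 0:
--             return 0
--         visited[r][c] = True
--         size = 1
--         size += dfs(r + 1, c)
--         size += dfs(r - 1, c)
--         size += dfs(r, c + 1)
--         size += dfs(r, c - 1)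
--         return size
--
--     count = 0
--     for r in range(rows):
--         for c in range(cols):
--             if matrix[r][c] == 1 and not visited[r][c]:
--                 island_size = dfs(r, c)
--                 if island_size > n:
--                     count += 1
--
--     return count
-- ===== SOURCE B (Python) =====
-- def q9(matrix, n):
--     if not matrix or not matrix[0]:
--         return 0
--
--     rows, cols = len(matrix), len(matrix[0])
--     visited = [[False] * cols for _ in range(rows)]
--
--     count = 0
--     for r in range(rows):
--         for c in range(cols):
--             if matrix[r][c] == 1 and not visited[r][c]:
--                 size = 0
--                 stack = [(r, c)]
--                 while stack:
--                     i, j = stack.pop()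
--                     if (not (0 <= i < len(visited))
--                             or not (0 <= j < len(visited[i]))
--                             or visited[i][j]
--                             or matrix[i][j] == 0):
--                         continue
--                     visited[i][j] = True
--                     size += 1
--                     stack.extend([(i, j - 1), (i, j + 1), (i - 1, j), (i + 1, j)])
--                 if size > n:
--                     count += 1
--
--     return count
-- ===== Notes on version B (the rewrite author's own statement) =====
-- stated objective: alternative
-- what changed: The recursive DFS flood fill is replaced by an iterative flood fill with an explicit stack (no recursion, so no Python recursion-depth limit), keeping the same scan order and strict size > n test.
import Mathlib
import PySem

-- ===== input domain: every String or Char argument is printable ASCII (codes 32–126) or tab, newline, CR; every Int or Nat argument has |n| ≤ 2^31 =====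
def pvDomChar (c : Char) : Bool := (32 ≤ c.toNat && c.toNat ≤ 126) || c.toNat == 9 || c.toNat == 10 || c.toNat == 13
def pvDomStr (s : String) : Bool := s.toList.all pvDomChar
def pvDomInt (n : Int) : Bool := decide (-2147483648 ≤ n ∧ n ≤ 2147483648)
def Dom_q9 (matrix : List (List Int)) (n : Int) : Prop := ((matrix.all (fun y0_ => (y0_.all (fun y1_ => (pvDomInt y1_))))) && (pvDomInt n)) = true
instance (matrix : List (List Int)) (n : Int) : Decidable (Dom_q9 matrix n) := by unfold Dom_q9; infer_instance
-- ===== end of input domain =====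

-- B replaces A's recursive DFS flood fill by an iterative explicit-stack flood fill
-- (same scan order, same strict size > n test); neither implementation mutates its arguments.

-- ===== PORT A =====
-- shared 2-d cell primitives (both Pythons read/write matrix/visited cells the same way)
def pvMget (m : List (List Int)) (i j : Nat) : Int := (m.getD i []).getD j 0
def pvVget (v : List (List Bool)) (i j : Nat) : Bool := (v.getD i []).getD j false
def pvVset (v : List (List Bool)) (i j : Nat) : List (List Bool) := v.set i ((v.getD i []).set j true)
-- number of not-yet-visited cells (termination measure for B's while loop)
def pvUnvis (v : List (List Bool)) : Nat := (v.map (fun row => row.count false)).sum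

-- A's dfs guard: r/c outside the rows×cols box, already visited, or a 0 cell
def pvBadA (m : List (List Int)) (rows cols : Int) (v : List (List Bool)) (r c : Int) : Bool :=
  decide (r < 0) || decide (rows ≤ r) || decide (c < 0) || decide (cols ≤ c) ||
  pvVget v r.toNat c.toNat || pvMget m r.toNat c.toNat == 0

-- A's recursive dfs; the fuel (rows*cols+1 at every call site) dominates the recursion
-- depth, which is bounded by the number of unvisited cells plus one
def pvDfsA (m : List (List Int)) (rows cols : Int) : Nat → Int → Int → List (List Bool) → Int × List (List Bool)
  | 0, _, _, v => (0, v)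
  | fuel+1, r, c, v =>
    if pvBadA m rows cols v r c then (0, v)
    else
      let v0 := pvVset v r.toNat c.toNat
      let p1 := pvDfsA m rows cols fuel (r+1) c v0
      let p2 := pvDfsA m rows cols fuel (r-1) c p1.2
      let p3 := pvDfsA m rows cols fuel r (c+1) p2.2
      let p4 := pvDfsA m rows cols fuel r (c-1) p3.2
      (1 + p1.1 + p2.1 + p3.1 + p4.1, p4.2)

def q9 (matrix : List (List Int)) (n : Int) : Int :=
  match matrix with
  | [] => 0
  | row0 :: _ =>
    if row0.length = 0 then 0
    else
      let rows := matrix.length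
      let cols := row0.length
      let v0 : List (List Bool) := List.replicate rows (List.replicate cols false)
      let fuel := rows * cols + 1
      (((List.range rows).foldl (fun st r =>
        (List.range cols).foldl (fun (st : Int × List (List Bool)) c =>
          if pvMget matrix r c == 1 && !pvVget st.2 r c then
            let p := pvDfsA matrix (rows : Int) (cols : Int) fuel (r : Int) (c : Int) st.2
            (if p.1 > n then st.1 + 1 else st.1, p.2)
          else st) st) (0, v0)) : Int × List (List Bool)).1

-- ===== PORT B =====
-- B's pop-time guard: bounds are read off the visited array itself
def pvBadB (m : List (List Int)) (v : List (List Bool)) (i j : Int) : Bool :=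
  !(decide (0 ≤ i) && decide (i < (v.length : Int))) ||
  !(decide (0 ≤ j) && decide (j < ((v.getD i.toNat []).length : Int))) ||
  pvVget v i.toNat j.toNat || pvMget m i.toNat j.toNat == 0

-- termination facts for B's while loop, cited by the port's decreasing_by

theorem pvCount_set_lt (l : List Bool) (j : Nat) (hj : j < l.length)
    (hf : l.getD j false = false) : (l.set j true).count false < l.count false := by
  induction l generalizing j with
  | nil => simp at hj
  | cons b bs ih =>
    cases j with
    | zero =>
      have hb : b = false := by simpa using hf
      subst hb; simp [List.count_cons]
    | succ j =>
      have := ih j (by simpa using hj) (by simpa using hf)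
      simp only [List.set, List.count_cons]; omega

theorem pvUnvis_cons (row : List Bool) (rest : List (List Bool)) :
    pvUnvis (row :: rest) = row.count false + pvUnvis rest := by
  simp [pvUnvis]

theorem pvUnvis_vset_lt (v : List (List Bool)) (a b : Nat) (ha : a < v.length)
    (hb : b < (v.getD a []).length) (hf : pvVget v a b = false) :
    pvUnvis (pvVset v a b) < pvUnvis v := by
  induction v generalizing a with
  | nil => simp at ha
  | cons row rest ih =>
    cases a with
    | zero =>
      have h := pvCount_set_lt row b (by simpa using hb) (by simpa [pvVget] using hf)
      simp only [pvVset, List.getD_cons_zero, List.set]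
      rw [pvUnvis_cons, pvUnvis_cons]; omega
    | succ a =>
      have h := ih a (by simpa using ha) (by simpa using hb) (by simpa [pvVget] using hf)
      simp only [pvVset, List.getD_cons_succ, List.set] at *
      rw [pvUnvis_cons, pvUnvis_cons]; omega

theorem pvBadB_false {m : List (List Int)} {v : List (List Bool)} {i j : Int}
    (h : pvBadB m v i j = false) :
    0 ≤ i ∧ i.toNat < v.length ∧ 0 ≤ j ∧ j.toNat < (v.getD i.toNat []).length ∧
      pvVget v i.toNat j.toNat = false ∧ ¬ pvMget m i.toNat j.toNat = 0 := by
  simp only [pvBadB, Bool.or_eq_false_iff, Bool.not_eq_false', Bool.and_eq_true,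
    decide_eq_true_eq, beq_eq_false_iff_ne] at h
  obtain ⟨⟨⟨⟨h1, h2⟩, h3, h4⟩, h5⟩, h6⟩ := h
  exact ⟨h1, by omega, h3, by omega, h5, h6⟩

def pvFloodB (m : List (List Int)) : List (Int × Int) → List (List Bool) → Int → Int × List (List Bool)
  | [], v, size => (size, v)
  | (i, j) :: rest, v, size =>
    if h : pvBadB m v i j then pvFloodB m rest v size
    else pvFloodB m ((i+1, j) :: (i-1, j) :: (i, j+1) :: (i, j-1) :: rest)
           (pvVset v i.toNat j.toNat) (size + 1)
termination_by stack v _ => (pvUnvis v, stack.length)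
decreasing_by
  · exact Prod.Lex.right _ (by simp)
  · apply Prod.Lex.left
    obtain ⟨_, h2, _, h4, h5, _⟩ := pvBadB_false (Bool.not_eq_true _ ▸ h)
    exact pvUnvis_vset_lt _ _ _ h2 h4 h5

def q9_alt (matrix : List (List Int)) (n : Int) : Int :=
  match matrix with
  | [] => 0
  | row0 :: _ =>
    if row0.length = 0 then 0
    else
      let rows := matrix.length
      let cols := row0.length
      let v0 : List (List Bool) := List.replicate rows (List.replicate cols false)
      (((List.range rows).foldl (fun st r =>
        (List.range cols).foldl (fun (st : Int × List (List Bool)) c =>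
          if pvMget matrix r c == 1 && !pvVget st.2 r c then
            let p := pvFloodB matrix [((r : Int), (c : Int))] st.2 0
            (if p.1 > n then st.1 + 1 else st.1, p.2)
          else st) st) (0, v0)) : Int × List (List Bool)).1

-- ===== PRECONDITION & SPEC =====
-- Pre_ excludes exactly the ragged matrices having a row shorter than the first row,
-- on which the Python A raises IndexError while scanning (so A returns no value there).
def Pre_q9 (matrix : List (List Int)) (n : Int) : Prop :=
  ∀ row ∈ matrix, (matrix.headD []).length ≤ row.length
instance (matrix : List (List Int)) (n : Int) : Decidable (Pre_q9 matrix n) := by unfold Pre_q9; infer_instance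
def pvWitness_q9 : List (List Int) × Int := ([[1, 0], [1, 1]], 1)

def Spec_q9 (matrix : List (List Int)) (n : Int) (out : Int) : Prop := out = q9_alt matrix n
instance (matrix : List (List Int)) (n : Int) (out : Int) : Decidable (Spec_q9 matrix n out) := by unfold Spec_q9; infer_instance

-- ===== CLAIM (what is proved, stated in full; the proofs are below) =====
def Claim_equal_q9 : Prop := ∀ (matrix : List (List Int)) (n : Int), Dom_q9 matrix n → Pre_q9 matrix n → Spec_q9 matrix n (q9 matrix n)

-- ===== LEMMAS AND PROOFS =====
theorem pvCount_set_le (l : List Bool) (j : Nat) : (l.set j true).count false ≤ l.count false := by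
  induction l generalizing j with
  | nil => simp
  | cons b bs ih =>
    cases j with
    | zero => cases b <;> simp [List.count_cons]
    | succ j => have := ih j; simp only [List.set, List.count_cons]; omega

def pvShape (R C : Nat) (v : List (List Bool)) : Prop :=
  v.length = R ∧ ∀ row ∈ v, row.length = C

theorem pvShape_vset {R C : Nat} {v : List (List Bool)} (h : pvShape R C v)
    (i j : Nat) : pvShape R C (pvVset v i j) := by
  by_cases hi : i < v.length
  · obtain ⟨hl, hr⟩ := h
    refine ⟨by simp [pvVset, hl], ?_⟩
    intro row hrow
    rcases List.mem_or_eq_of_mem_set hrow with h' | h'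
    · exact hr _ h'
    · subst h'
      rw [List.length_set, List.getD_eq_getElem _ _ hi]
      exact hr _ (List.getElem_mem hi)
  · unfold pvVset
    rw [List.set_eq_of_length_le (by omega)]
    exact h

theorem pvUnvis_vset_le (v : List (List Bool)) (i j : Nat) :
    pvUnvis (pvVset v i j) ≤ pvUnvis v := by
  induction v generalizing i with
  | nil => simp [pvVset]
  | cons row rest ih =>
    cases i with
    | zero =>
      have h := pvCount_set_le row j
      simp only [pvVset, List.getD_cons_zero, List.set]
      rw [pvUnvis_cons, pvUnvis_cons]; omega
    | succ i =>
      have h := ih i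
      simp only [pvVset, List.getD_cons_succ, List.set] at *
      rw [pvUnvis_cons, pvUnvis_cons]; omega

theorem pvDfsA_mono (m : List (List Int)) (rows cols : Int) (fuel : Nat) :
    ∀ (r c : Int) (v : List (List Bool)), pvUnvis (pvDfsA m rows cols fuel r c v).2 ≤ pvUnvis v := by
  induction fuel with
  | zero => intro r c v; simp [pvDfsA]
  | succ fuel ih =>
    intro r c v
    rw [pvDfsA]
    split
    · exact le_rfl
    · exact le_trans (ih _ _ _) (le_trans (ih _ _ _) (le_trans (ih _ _ _)
        (le_trans (ih _ _ _) (pvUnvis_vset_le _ _ _))))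

theorem pvDfsA_shape {R C : Nat} (m : List (List Int)) (rows cols : Int) (fuel : Nat) :
    ∀ (r c : Int) (v : List (List Bool)), pvShape R C v → pvShape R C (pvDfsA m rows cols fuel r c v).2 := by
  induction fuel with
  | zero => intro r c v h; simpa [pvDfsA] using h
  | succ fuel ih =>
    intro r c v h
    rw [pvDfsA]
    split
    · exact h
    · exact ih _ _ _ (ih _ _ _ (ih _ _ _ (ih _ _ _ (pvShape_vset h _ _))))

theorem pvBad_eq (m : List (List Int)) (R C : Nat) (v : List (List Bool))
    (h : pvShape R C v) (i j : Int) :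
    pvBadB m v i j = pvBadA m (R : Int) (C : Int) v i j := by
  obtain ⟨hl, hr⟩ := h
  apply Bool.eq_iff_iff.mpr
  by_cases hin : 0 ≤ i ∧ i < (R : Int)
  · have hi : i.toNat < v.length := by omega
    have hrow : (v.getD i.toNat []).length = C := by
      rw [List.getD_eq_getElem _ _ hi]; exact hr _ (List.getElem_mem hi)
    simp only [pvBadB, pvBadA, hl, hrow, Bool.or_eq_true, Bool.not_eq_true', Bool.and_eq_false_iff,
      decide_eq_false_iff_not, decide_eq_true_eq, beq_iff_eq]
    by_cases hP : pvVget v i.toNat j.toNat <;>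
      by_cases hQ : pvMget m i.toNat j.toNat = 0 <;> simp [hP, hQ] <;> omega
  · have hB : pvBadB m v i j = true := by
      simp only [pvBadB, hl, Bool.or_eq_true, Bool.not_eq_true', Bool.and_eq_false_iff,
        decide_eq_false_iff_not]
      left; omega
    have hA : pvBadA m (R : Int) (C : Int) v i j = true := by
      simp only [pvBadA, Bool.or_eq_true, decide_eq_true_eq]
      omega
    simp [hA, hB]

-- the defunctionalization lemma: one stack entry processed by B's loop is one dfs call of A
theorem pvFlood_eq_dfs (m : List (List Int)) (R C : Nat) (fuel : Nat) :
    ∀ (i j : Int) (rest : List (Int × Int)) (v : List (List Bool)) (size : Int),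
      pvShape R C v → pvUnvis v < fuel →
      pvFloodB m ((i, j) :: rest) v size =
        pvFloodB m rest (pvDfsA m (R : Int) (C : Int) fuel i j v).2
          (size + (pvDfsA m (R : Int) (C : Int) fuel i j v).1) := by
  induction fuel with
  | zero => intro _ _ _ _ _ _ h; omega
  | succ fuel ih =>
    intro i j rest v size hsh hfu
    rw [pvFloodB]
    by_cases hb : pvBadB m v i j
    · rw [dif_pos hb]
      have hba : pvBadA m (R : Int) (C : Int) v i j := by rwa [pvBad_eq m R C v hsh] at hb
      rw [pvDfsA, if_pos hba]
      norm_num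
    · rw [dif_neg hb]
      have hba : ¬ pvBadA m (R : Int) (C : Int) v i j = true := by
        rwa [pvBad_eq m R C v hsh] at hb
      obtain ⟨_, h2, _, h4, h5, _⟩ := pvBadB_false (Bool.not_eq_true _ ▸ hb)
      have hlt : pvUnvis (pvVset v i.toNat j.toNat) < pvUnvis v := pvUnvis_vset_lt _ _ _ h2 h4 h5
      set v0 := pvVset v i.toNat j.toNat with hv0
      have hs0 : pvShape R C v0 := pvShape_vset hsh _ _
      have hf0 : pvUnvis v0 < fuel := by omega
      set p1 := pvDfsA m (R : Int) (C : Int) fuel (i+1) j v0 with hp1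
      have hs1 : pvShape R C p1.2 := pvDfsA_shape _ _ _ _ _ _ _ hs0
      have hf1 : pvUnvis p1.2 < fuel := lt_of_le_of_lt (pvDfsA_mono _ _ _ _ _ _ _) hf0
      set p2 := pvDfsA m (R : Int) (C : Int) fuel (i-1) j p1.2 with hp2
      have hs2 : pvShape R C p2.2 := pvDfsA_shape _ _ _ _ _ _ _ hs1
      have hf2 : pvUnvis p2.2 < fuel := lt_of_le_of_lt (pvDfsA_mono _ _ _ _ _ _ _) hf1
      set p3 := pvDfsA m (R : Int) (C : Int) fuel i (j+1) p2.2 with hp3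
      have hs3 : pvShape R C p3.2 := pvDfsA_shape _ _ _ _ _ _ _ hs2
      have hf3 : pvUnvis p3.2 < fuel := lt_of_le_of_lt (pvDfsA_mono _ _ _ _ _ _ _) hf2
      rw [ih (i+1) j _ v0 (size+1) hs0 hf0]
      rw [ih (i-1) j _ p1.2 _ hs1 hf1]
      rw [ih i (j+1) _ p2.2 _ hs2 hf2]
      rw [ih i (j-1) _ p3.2 _ hs3 hf3]
      rw [pvDfsA, if_neg hba]
      simp only [← hv0, ← hp1, ← hp2, ← hp3]
      congr 1
      ring

theorem pvUnvis_le_of_shape {R C : Nat} {v : List (List Bool)} (h : pvShape R C v) :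
    pvUnvis v ≤ R * C := by
  obtain ⟨hl, hr⟩ := h
  subst hl
  induction v with
  | nil => simp [pvUnvis]
  | cons row rest ih =>
    have h1 : row.count false ≤ C := le_trans (List.count_le_length) (le_of_eq (hr _ (by simp)))
    have h2 := ih (fun r hrr => hr r (by simp [hrr]))
    rw [pvUnvis_cons]
    simp only [List.length_cons]
    calc row.count false + pvUnvis rest ≤ C + rest.length * C := by omega
    _ = (rest.length + 1) * C := by ring

theorem pvInner (m : List (List Int)) (n : Int) (R C : Nat) (r : Nat) :
    ∀ (cs : List Nat) (st : Int × List (List Bool)), pvShape R C st.2 →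
      cs.foldl (fun (st : Int × List (List Bool)) c =>
          if pvMget m r c == 1 && !pvVget st.2 r c then
            let p := pvDfsA m (R : Int) (C : Int) (R * C + 1) (r : Int) (c : Int) st.2
            (if p.1 > n then st.1 + 1 else st.1, p.2)
          else st) st
        = cs.foldl (fun (st : Int × List (List Bool)) c =>
          if pvMget m r c == 1 && !pvVget st.2 r c then
            let p := pvFloodB m [((r : Int), (c : Int))] st.2 0
            (if p.1 > n then st.1 + 1 else st.1, p.2)
          else st) st
      ∧ pvShape R C (cs.foldl (fun (st : Int × List (List Bool)) c =>
          if pvMget m r c == 1 && !pvVget st.2 r c then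
            let p := pvDfsA m (R : Int) (C : Int) (R * C + 1) (r : Int) (c : Int) st.2
            (if p.1 > n then st.1 + 1 else st.1, p.2)
          else st) st).2 := by
  intro cs
  induction cs with
  | nil => intro st h; exact ⟨rfl, h⟩
  | cons c cs ih =>
    intro st h
    simp only [List.foldl_cons]
    by_cases hc : (pvMget m r c == 1 && !pvVget st.2 r c) = true
    · have hfu : pvUnvis st.2 < R * C + 1 := Nat.lt_succ_of_le (pvUnvis_le_of_shape h)
      have hfl := pvFlood_eq_dfs m R C (R * C + 1) (r : Int) (c : Int) [] st.2 0 h hfu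
      set p := pvDfsA m (R : Int) (C : Int) (R * C + 1) (r : Int) (c : Int) st.2 with hp
      have hfl' : pvFloodB m [((r : Int), (c : Int))] st.2 0 = (p.1, p.2) := by
        rw [hfl, pvFloodB]; simp
      have hstep : (if pvMget m r c == 1 && !pvVget st.2 r c then
            let p' := pvFloodB m [((r : Int), (c : Int))] st.2 0
            (if p'.1 > n then st.1 + 1 else st.1, p'.2)
          else st)
          = (if pvMget m r c == 1 && !pvVget st.2 r c then
            (if p.1 > n then st.1 + 1 else st.1, p.2)
          else st) := by
        rw [if_pos hc, if_pos hc, hfl']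
      rw [hstep]
      have hsh' : pvShape R C (if pvMget m r c == 1 && !pvVget st.2 r c then
            (if p.1 > n then st.1 + 1 else st.1, p.2) else st).2 := by
        rw [if_pos hc]
        exact pvDfsA_shape _ _ _ _ _ _ _ h
      have := ih _ hsh'
      constructor
      · rw [← this.1]
      · convert this.2 using 3
    · have h1 : (if (pvMget m r c == 1 && !pvVget st.2 r c) = true then
            let p := pvDfsA m (R : Int) (C : Int) (R * C + 1) (r : Int) (c : Int) st.2
            (if p.1 > n then st.1 + 1 else st.1, p.2) else st) = st := if_neg hc
      have h2 : (if (pvMget m r c == 1 && !pvVget st.2 r c) = true then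
            let p := pvFloodB m [((r : Int), (c : Int))] st.2 0
            (if p.1 > n then st.1 + 1 else st.1, p.2) else st) = st := if_neg hc
      rw [h1, h2]
      exact ih st h

theorem pvOuter (m : List (List Int)) (n : Int) (R C : Nat) :
    ∀ (rs : List Nat) (st : Int × List (List Bool)), pvShape R C st.2 →
      rs.foldl (fun st r =>
        (List.range C).foldl (fun (st : Int × List (List Bool)) c =>
          if pvMget m r c == 1 && !pvVget st.2 r c then
            let p := pvDfsA m (R : Int) (C : Int) (R * C + 1) (r : Int) (c : Int) st.2
            (if p.1 > n then st.1 + 1 else st.1, p.2)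
          else st) st) st
      = rs.foldl (fun st r =>
        (List.range C).foldl (fun (st : Int × List (List Bool)) c =>
          if pvMget m r c == 1 && !pvVget st.2 r c then
            let p := pvFloodB m [((r : Int), (c : Int))] st.2 0
            (if p.1 > n then st.1 + 1 else st.1, p.2)
          else st) st) st := by
  intro rs
  induction rs with
  | nil => intro st h; rfl
  | cons r rs ih =>
    intro st h
    simp only [List.foldl_cons]
    obtain ⟨heq, hsh⟩ := pvInner m n R C r (List.range C) st h
    rw [← heq]
    exact ih _ hsh

theorem pvShape_init (R C : Nat) : pvShape R C (List.replicate R (List.replicate C false)) := by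
  constructor
  · simp
  · intro row hrow
    rw [List.eq_of_mem_replicate hrow]
    simp

-- ===== VERDICT (by name: the statement is the Claim_ definition above) =====
theorem q9_spec : Claim_equal_q9 := by
  intro matrix n _ _
  unfold Spec_q9
  match matrix with
  | [] => rfl
  | row0 :: rest =>
    unfold q9 q9_alt
    by_cases h0 : row0.length = 0
    · simp [h0]
    · simp only [if_neg h0]
      exact congrArg Prod.fst
        (pvOuter (row0 :: rest) n (row0 :: rest).length row0.length
          (List.range (row0 :: rest).length)
          (0, List.replicate (row0 :: rest).length (List.replicate row0.length false))
          (pvShape_init _ _))
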